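-- pv_equiv track=rewrite | github.com/braianrodrigues/datafusion-analyzer | datafusion-analyzer.py | extract_profile_picture_info
-- ===== SOURCE A (Python) =====
-- def skip_empty_and_whatsapp_pages(lines, idx):
--     n = len(lines)
--     while idx < n:
--         s = lines[idx].strip()
--         if s and not s.startswith("WhatsApp Business Record Page"):
--             break
--         idx += 1
--     return idx
--
-- def extract_profile_picture_info(lines):
--     profile_info = {}
--     i = 0
--     n = len(lines)
--     while i < n:
--         line = lines[i].strip()
--         if line == "Profile Picture":
--             i += 1
--             i = skip_empty_and_whatsapp_pages(lines, i)
--             if i < n and lines[i].strip().startswith("Linked Media File:"):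
--                 parts = lines[i].strip().split(":", 1)
--                 if len(parts) > 1 and parts[1].strip():
--                     profile_info["Linked Media File"] = parts[1].strip()
--                 else:
--                     i += 1
--                     i = skip_empty_and_whatsapp_pages(lines, i)
--                     if i < n:
--                         profile_info["Linked Media File"] = lines[i].strip()
--                 i += 1
--
--             i = skip_empty_and_whatsapp_pages(lines, i)
--             if i < n and lines[i].strip() == "Push Name":
--                 i += 1
--                 i = skip_empty_and_whatsapp_pages(lines, i)
--                 if i < n:
--                     profile_info["Push Name"] = lines[i].strip()
--             elif i < n and lines[i].strip().startswith("Push Name"):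
--                 _, push_value = lines[i].strip().split("Push Name", 1)
--                 profile_info["Push Name"] = push_value.strip()
--             break
--         i += 1
--     return profile_info if profile_info else None
-- ===== SOURCE B (Python) =====
-- def extract_profile_picture_info(lines):
--     ms = [s for s in (l.strip() for l in lines)
--           if s and not s.startswith("WhatsApp Business Record Page")]
--     try:
--         rest = ms[ms.index("Profile Picture") + 1:]
--     except ValueError:
--         return None
--     info = {}
--     if rest and rest[0].startswith("Linked Media File:"):
--         tail = rest[0].split(":", 1)[1].strip()
--         if tail:
--             info["Linked Media File"] = tail
--             rest = rest[1:]
--         else: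
--             rest = rest[1:]
--             if rest:
--                 info["Linked Media File"] = rest[0]
--                 rest = rest[1:]
--     if rest:
--         if rest[0] == "Push Name":
--             if len(rest) > 1:
--                 info["Push Name"] = rest[1]
--         elif rest[0].startswith("Push Name"):
--             info["Push Name"] = rest[0].split("Push Name", 1)[1].strip()
--     return info or None
-- ===== Notes on version B (the rewrite author's own statement) =====
-- stated objective: simpler
-- what changed: B filters the meaningful stripped lines once up front and then parses that list sequentially by destructuring, instead of A's index-walking while loop with a repeated skip-empty/header helper.
import Mathlib
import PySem

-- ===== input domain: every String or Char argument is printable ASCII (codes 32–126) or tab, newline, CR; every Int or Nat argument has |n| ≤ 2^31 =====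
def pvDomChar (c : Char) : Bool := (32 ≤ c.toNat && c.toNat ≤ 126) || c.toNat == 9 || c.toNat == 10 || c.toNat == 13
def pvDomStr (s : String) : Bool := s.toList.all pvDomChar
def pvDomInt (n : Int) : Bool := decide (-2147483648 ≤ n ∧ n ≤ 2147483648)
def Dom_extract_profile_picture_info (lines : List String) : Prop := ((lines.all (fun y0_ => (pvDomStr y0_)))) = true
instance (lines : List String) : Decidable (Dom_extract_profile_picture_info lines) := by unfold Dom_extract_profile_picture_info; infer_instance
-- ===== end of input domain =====

-- B re-implements A by first filtering the meaningful stripped lines and then parsing that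
-- list sequentially (objective: simpler decomposition; no speed claim).
-- In both programs each dict key is assigned at most once, so dict assignment is ported
-- exactly as appending the pair to the association list.

-- ===== PORT A =====
-- port of skip_empty_and_whatsapp_pages (idx is always ≥ 0, so it is carried as a Nat)
def pvSkip (lines : List String) (idx : Nat) : Nat :=
  if h : idx < lines.length then
    let s := PySem.Str.strip (lines.getD idx "")
    if s ≠ "" ∧ PySem.Str.startswith s "WhatsApp Business Record Page" = false then idx
    else pvSkip lines (idx + 1)
  else idx
termination_by lines.length - idx

-- the Push-Name tail of A's body (from the second `i = skip_...` on); the split "Push Name"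
-- branch is only reached when the separator occurs, so the 2-element unpacking is `getD 1 ""`
def pvPushA (lines : List String) (d : List (String × String)) (i0 : Nat) : List (String × String) :=
  let i := pvSkip lines i0
  if i < lines.length ∧ PySem.Str.strip (lines.getD i "") = "Push Name" then
    let k := pvSkip lines (i + 1)
    if k < lines.length then d ++ [("Push Name", PySem.Str.strip (lines.getD k ""))] else d
  else if i < lines.length ∧ PySem.Str.startswith (PySem.Str.strip (lines.getD i "")) "Push Name" = true then
    d ++ [("Push Name", PySem.Str.strip (((PySem.Str.splitMax? (PySem.Str.strip (lines.getD i "")) "Push Name" 1).getD []).getD 1 ""))]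
  else d

-- A's "Linked Media File" block, at i = the first meaningful index after the marker;
-- each branch continues with the Push-Name tail (pvPushA) on its own dict and index
def pvLMFA (lines : List String) (i : Nat) : List (String × String) :=
  if i < lines.length ∧ PySem.Str.startswith (PySem.Str.strip (lines.getD i "")) "Linked Media File:" = true then
    if ((PySem.Str.splitMax? (PySem.Str.strip (lines.getD i "")) ":" 1).getD []).length > 1 ∧
        PySem.Str.strip (((PySem.Str.splitMax? (PySem.Str.strip (lines.getD i "")) ":" 1).getD []).getD 1 "") ≠ "" then
      pvPushA lines [("Linked Media File", PySem.Str.strip (((PySem.Str.splitMax? (PySem.Str.strip (lines.getD i "")) ":" 1).getD []).getD 1 ""))] (i + 1)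
    else
      if pvSkip lines (i + 1) < lines.length then
        pvPushA lines [("Linked Media File", PySem.Str.strip (lines.getD (pvSkip lines (i + 1)) ""))] (pvSkip lines (i + 1) + 1)
      else pvPushA lines [] (pvSkip lines (i + 1) + 1)
  else pvPushA lines [] i

-- A's body once "Profile Picture" was found (i0 = index after the marker line)
def pvBodyA (lines : List String) (i0 : Nat) : List (String × String) :=
  pvLMFA lines (pvSkip lines i0)

-- A's outer while loop (breaks at the first "Profile Picture")
def pvLoopA (lines : List String) (i : Nat) : List (String × String) :=
  if h : i < lines.length then
    if PySem.Str.strip (lines.getD i "") = "Profile Picture" then pvBodyA lines (i + 1)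
    else pvLoopA lines (i + 1)
  else []
termination_by lines.length - i

def extract_profile_picture_info (lines : List String) : Option (List (String × String)) :=
  let d := pvLoopA lines 0
  if d = [] then none else some d

-- ===== PORT B =====
-- the comprehension's filter: non-empty and not a WhatsApp page header
def pvMeaningful (s : String) : Bool :=
  !(s == "") && !(PySem.Str.startswith s "WhatsApp Business Record Page")

-- Source B's "Linked Media File" block: returns (info so far, remaining rest)
def pvStage1 (rest : List String) : List (String × String) × List String :=
  match rest with
  | s :: t =>
    if PySem.Str.startswith s "Linked Media File:" then
      let tail := PySem.Str.strip (((PySem.Str.splitMax? s ":" 1).getD []).getD 1 "")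
      if tail ≠ "" then ([("Linked Media File", tail)], t)
      else
        match t with
        | v :: t' => ([("Linked Media File", v)], t')
        | [] => ([], [])
    else ([], s :: t)
  | [] => ([], [])

-- Source B's "Push Name" block
def pvStage2 (d : List (String × String)) (rest : List String) : List (String × String) :=
  match rest with
  | s :: t =>
    if s == "Push Name" then
      match t with
      | v :: _ => d ++ [("Push Name", v)]
      | [] => d
    else if PySem.Str.startswith s "Push Name" then
      d ++ [("Push Name", PySem.Str.strip (((PySem.Str.splitMax? s "Push Name" 1).getD []).getD 1 ""))]
    else d
  | [] => d

def pvParseRest (rest : List String) : List (String × String) :=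
  let r := pvStage1 rest
  pvStage2 r.1 r.2

def extract_profile_picture_info_alt (lines : List String) : Option (List (String × String)) :=
  let ms := (lines.map PySem.Str.strip).filter pvMeaningful
  match PySem.List.index? ms "Profile Picture" with
  | none => none
  | some j =>
    let info := pvParseRest (ms.drop (j + 1))
    if info = [] then none else some info

-- ===== PRECONDITION & SPEC =====
def Spec_extract_profile_picture_info (lines : List String) (out : Option (List (String × String))) : Prop := out = extract_profile_picture_info_alt lines
instance (lines : List String) (out : Option (List (String × String))) : Decidable (Spec_extract_profile_picture_info lines out) := by unfold Spec_extract_profile_picture_info; infer_instance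

-- ===== CLAIM (what is proved, stated in full; the proofs are below) =====
def Claim_equal_extract_profile_picture_info : Prop := ∀ (lines : List String), Dom_extract_profile_picture_info lines → Spec_extract_profile_picture_info lines (extract_profile_picture_info lines)

-- ===== LEMMAS AND PROOFS =====

-- the meaningful stripped lines of the suffix of `lines` from index i
def msFrom (lines : List String) (i : Nat) : List String :=
  ((lines.drop i).map PySem.Str.strip).filter pvMeaningful

lemma msFrom_ge (lines : List String) (i : Nat) (h : lines.length ≤ i) : msFrom lines i = [] := by
  simp [msFrom, List.drop_eq_nil_of_le h]

lemma msFrom_lt (lines : List String) (i : Nat) (h : i < lines.length) :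
    msFrom lines i =
      (if pvMeaningful (PySem.Str.strip (lines.getD i "")) then
        [PySem.Str.strip (lines.getD i "")] else []) ++ msFrom lines (i + 1) := by
  rw [msFrom, msFrom, List.drop_eq_getElem_cons h, List.getD_eq_getElem lines "" h,
    List.map_cons, List.filter_cons]
  split <;> simp

lemma pvMeaningful_true_iff (s : String) :
    pvMeaningful s = true ↔
      s ≠ "" ∧ PySem.Str.startswith s "WhatsApp Business Record Page" = false := by
  unfold pvMeaningful
  simp only [Bool.and_eq_true, Bool.not_eq_true', beq_eq_false_iff_ne]

lemma pvMeaningful_false_iff (s : String) :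
    pvMeaningful s = false ↔
      s = "" ∨ PySem.Str.startswith s "WhatsApp Business Record Page" = true := by
  rw [← Bool.not_eq_true, pvMeaningful_true_iff]
  constructor
  · intro hn
    by_cases he : s = ""
    · exact Or.inl he
    · rcases Bool.eq_false_or_eq_true (PySem.Str.startswith s "WhatsApp Business Record Page") with ht | hf
      · exact Or.inr ht
      · exact absurd ⟨he, hf⟩ hn
  · rintro (he | hw) ⟨h1, h2⟩
    · exact h1 he
    · rw [hw] at h2; cases h2

lemma pvSkip_spec (lines : List String) (i : Nat) :
    msFrom lines i = msFrom lines (pvSkip lines i) ∧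
    (pvSkip lines i < lines.length →
      pvMeaningful (PySem.Str.strip (lines.getD (pvSkip lines i) "")) = true) := by
  fun_induction pvSkip lines i with
  | case1 idx h s hc =>
    exact ⟨rfl, fun _ => (pvMeaningful_true_iff _).mpr hc⟩
  | case2 idx h s hc ih =>
    have hm : pvMeaningful (PySem.Str.strip (lines.getD idx "")) = false := by
      rw [pvMeaningful_false_iff]
      by_cases he : s = ""
      · exact Or.inl he
      · rcases Bool.eq_false_or_eq_true (PySem.Str.startswith s "WhatsApp Business Record Page") with ht | hf
        · exact Or.inr ht
        · exact absurd ⟨he, hf⟩ hc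
    have hstep : msFrom lines idx = msFrom lines (idx + 1) := by
      rw [msFrom_lt lines idx h, hm]; simp
    exact ⟨hstep.trans ih.1, ih.2⟩
  | case3 idx h =>
    exact ⟨rfl, fun hx => absurd hx h⟩

lemma msFrom_skip_lt (lines : List String) (i : Nat) (h : pvSkip lines i < lines.length) :
    msFrom lines i =
      PySem.Str.strip (lines.getD (pvSkip lines i) "") :: msFrom lines (pvSkip lines i + 1) := by
  rw [(pvSkip_spec lines i).1, msFrom_lt lines _ h, (pvSkip_spec lines i).2 h]
  simp

lemma msFrom_skip_ge (lines : List String) (i : Nat) (h : ¬ pvSkip lines i < lines.length) :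
    msFrom lines i = [] :=
  (pvSkip_spec lines i).1.trans (msFrom_ge lines _ (Nat.le_of_not_lt h))

lemma push_eq (lines : List String) (d : List (String × String)) (i0 : Nat) :
    pvPushA lines d i0 = pvStage2 d (msFrom lines i0) := by
  unfold pvPushA
  by_cases hj : pvSkip lines i0 < lines.length
  · rw [msFrom_skip_lt lines i0 hj]
    by_cases hpn : PySem.Str.strip (lines.getD (pvSkip lines i0) "") = "Push Name"
    · rw [if_pos ⟨hj, hpn⟩]
      simp only [pvStage2, hpn, BEq.rfl, if_true]
      by_cases hk : pvSkip lines (pvSkip lines i0 + 1) < lines.length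
      · rw [if_pos hk, msFrom_skip_lt lines _ hk]
      · rw [if_neg hk, msFrom_skip_ge lines _ hk]
    · rw [if_neg (by rintro ⟨_, hx⟩; exact hpn hx)]
      have hne : (PySem.Str.strip (lines.getD (pvSkip lines i0) "") == "Push Name") = false :=
        beq_eq_false_iff_ne.mpr hpn
      by_cases hsw : PySem.Str.startswith (PySem.Str.strip (lines.getD (pvSkip lines i0) "")) "Push Name" = true
      · rw [if_pos ⟨hj, hsw⟩]
        simp only [pvStage2, hne, Bool.false_eq_true, if_false, hsw, if_true]
      · rw [if_neg (by rintro ⟨_, hx⟩; exact hsw hx)]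
        simp only [pvStage2, hne, Bool.false_eq_true, if_false]
        rw [if_neg hsw]
  · rw [msFrom_skip_ge lines i0 hj, if_neg (by rintro ⟨hx, _⟩; exact hj hx),
      if_neg (by rintro ⟨hx, _⟩; exact hj hx)]
    simp [pvStage2]

lemma body_eq (lines : List String) (i0 : Nat) :
    pvBodyA lines i0 = pvParseRest (msFrom lines i0) := by
  unfold pvBodyA pvLMFA pvParseRest
  by_cases hj : pvSkip lines i0 < lines.length
  · rw [msFrom_skip_lt lines i0 hj]
    by_cases hsw : PySem.Str.startswith (PySem.Str.strip (lines.getD (pvSkip lines i0) "")) "Linked Media File:" = true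
    · rw [if_pos ⟨hj, hsw⟩]
      simp only [pvStage1, hsw, if_true]
      by_cases hc : ((PySem.Str.splitMax? (PySem.Str.strip (lines.getD (pvSkip lines i0) "")) ":" 1).getD []).length > 1 ∧
          PySem.Str.strip (((PySem.Str.splitMax? (PySem.Str.strip (lines.getD (pvSkip lines i0) "")) ":" 1).getD []).getD 1 "") ≠ ""
      · rw [if_pos hc, if_pos hc.2]
        exact push_eq lines _ _
      · have htl : PySem.Str.strip (((PySem.Str.splitMax? (PySem.Str.strip (lines.getD (pvSkip lines i0) "")) ":" 1).getD []).getD 1 "") = "" := by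
          by_cases hl : ((PySem.Str.splitMax? (PySem.Str.strip (lines.getD (pvSkip lines i0) "")) ":" 1).getD []).length > 1
          · by_contra hne; exact hc ⟨hl, hne⟩
          · rw [List.getD_eq_default _ _ (by omega)]
            rfl
        rw [if_neg hc, htl]
        simp only [ne_eq, not_true_eq_false, if_false]
        by_cases hk : pvSkip lines (pvSkip lines i0 + 1) < lines.length
        · rw [if_pos hk, msFrom_skip_lt lines _ hk]
          exact push_eq lines _ _
        · rw [if_neg hk, msFrom_skip_ge lines _ hk]
          have h2 : msFrom lines (pvSkip lines (pvSkip lines i0 + 1) + 1) = [] :=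
            msFrom_ge lines _ (Nat.le_succ_of_le (Nat.le_of_not_lt hk))
          rw [push_eq lines _ _, h2]
    · rw [if_neg (by rintro ⟨_, hx⟩; exact hsw hx)]
      simp only [pvStage1]
      rw [if_neg hsw, push_eq lines _ _, ← msFrom_skip_lt lines i0 hj, (pvSkip_spec lines i0).1]
  · rw [msFrom_skip_ge lines i0 hj, if_neg (by rintro ⟨hx, _⟩; exact hj hx)]
    simp only [pvStage1]
    rw [push_eq lines _ _, msFrom_ge lines _ (Nat.le_of_not_lt hj)]

lemma pp_meaningful : pvMeaningful "Profile Picture" = true := by decide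

lemma loop_eq (lines : List String) (i : Nat) :
    pvLoopA lines i =
      (match PySem.List.index? (msFrom lines i) "Profile Picture" with
        | none => ([] : List (String × String))
        | some j => pvParseRest ((msFrom lines i).drop (j + 1))) := by
  fun_induction pvLoopA lines i with
  | case1 idx h hpp =>
    have hm : pvMeaningful (PySem.Str.strip (lines.getD idx "")) = true := by
      rw [hpp]; exact pp_meaningful
    rw [msFrom_lt lines idx h, hm, hpp]
    simp only [if_true, List.singleton_append, PySem.List.index?_cons_self]
    exact body_eq lines (idx + 1)
  | case2 idx h hpp ih =>
    by_cases hm : pvMeaningful (PySem.Str.strip (lines.getD idx "")) = true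
    · rw [msFrom_lt lines idx h, hm]
      simp only [if_true, List.singleton_append]
      rw [PySem.List.index?_cons_of_ne _ hpp]
      cases hidx : PySem.List.index? (msFrom lines (idx + 1)) "Profile Picture" with
      | none => rw [hidx] at ih; simpa using ih
      | some j => rw [hidx] at ih; simpa using ih
    · rw [msFrom_lt lines idx h, Bool.not_eq_true] at *
      rw [hm]
      simpa using ih
  | case3 idx h =>
    rw [msFrom_ge lines idx (Nat.le_of_not_lt h)]
    simp [PySem.List.index?_eq_idxOf?]

theorem extract_profile_picture_info_spec : Claim_equal_extract_profile_picture_info := by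
  intro lines _
  unfold Spec_extract_profile_picture_info extract_profile_picture_info extract_profile_picture_info_alt
  have hms : (lines.map PySem.Str.strip).filter pvMeaningful = msFrom lines 0 := by
    simp [msFrom]
  rw [loop_eq lines 0]
  cases hidx : PySem.List.index? (msFrom lines 0) "Profile Picture" with
  | none => rw [PySem.List.index?_eq_idxOf?] at hidx; simp [hms, hidx]
  | some j => rw [PySem.List.index?_eq_idxOf?] at hidx; simp [hms, hidx]
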